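-- pv_equiv track=rewrite | github.com/admiralbolt/algorithms | misc/decreasing_triplet.py | decreasing_triplet_chain
-- ===== SOURCE A (Python) =====
-- def decreasing_triplet_chain(l):
--   """
--   Given an integer array A, is there a triple i,j,k s.t. i < j < k AND
--   l[i] > l[j] > l[k]. Example:
--   Input: [5, 6, 3, 8, 1]
--   Output: True
--
--   Input: [5, 6, 4, 9]
--   Output: False
--   """
--   if len(l) < 3:
--     return False
--   # Chains will be a list of lists representing descending chains.
--   chains = []
--   for value in l:
--     create_new_chain = True
--     for chain in chains:
--       if value > chain[-1]:
--         if len(chain) >= 2 and value < chain[-2]: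
--           chain[-1] = value
--           create_new_chain = False
--       elif value < chain[-1]:
--         chain.append(value)
--         create_new_chain = False
--     if create_new_chain:
--       chains.append([value])
--   for chain in chains:
--     if len(chain) >= 3:
--       return True
--   return False
-- ===== SOURCE B (Python) =====
-- def decreasing_triplet_chain(l):
--   """Single pass: track the max so far and the best (largest) value that has a
--   strictly greater element before it; a triple exists when a value drops below
--   the latter."""
--   first = None   # max of the prefix seen so far
--   second = None  # max value in the prefix having a strictly greater earlier value
--   for x in l:
--     if second is not None and x < second:
--       return True
--     if first is None or x >= first:
--       first = x
--     elif second is None or x > second: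
--       second = x
--   return False
-- ===== Notes on version B (the rewrite author's own statement) =====
-- stated objective: faster
-- what changed: Replaced the list-of-descending-chains construction (each value scanned against every chain) by a single pass tracking just two values: the prefix maximum and the largest value with a strictly greater earlier element, returning True when a value drops below the latter.
import Mathlib
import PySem

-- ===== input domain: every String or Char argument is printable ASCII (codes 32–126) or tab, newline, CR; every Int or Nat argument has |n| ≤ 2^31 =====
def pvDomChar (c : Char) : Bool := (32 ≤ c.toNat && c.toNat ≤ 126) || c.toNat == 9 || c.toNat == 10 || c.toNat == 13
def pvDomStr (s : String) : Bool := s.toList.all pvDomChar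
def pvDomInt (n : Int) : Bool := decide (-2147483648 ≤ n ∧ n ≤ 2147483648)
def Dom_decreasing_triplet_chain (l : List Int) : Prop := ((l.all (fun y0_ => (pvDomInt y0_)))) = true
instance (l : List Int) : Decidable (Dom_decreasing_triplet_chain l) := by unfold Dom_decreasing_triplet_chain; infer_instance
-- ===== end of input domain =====

-- B replaces A's quadratic list-of-chains scan by a linear two-candidate pass (objective: faster).

-- ===== PORT A =====

-- one chain under one value: (updated chain, was it modified?)
def a_stepChain (value : Int) (chain : List Int) : List Int × Bool :=
  match PySem.List.pyGet? chain (-1) with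
  | none => (chain, false)   -- unreachable: chains are never empty
  | some last =>
    if value > last then
      if 2 ≤ chain.length then
        match PySem.List.pyGet? chain (-2) with
        | none => (chain, false)   -- unreachable when 2 ≤ length
        | some secondLast =>
          if value < secondLast then (chain.dropLast ++ [value], false)  -- chain[-1] = value; flag cleared
          else (chain, false)
      else (chain, false)
    else if value < last then (chain ++ [value], true)
    else (chain, false)

-- Python: chain[-1] = value also sets create_new_chain = False; record both kinds of modification
def a_chainTouched (value : Int) (chain : List Int) : Bool :=
  match PySem.List.pyGet? chain (-1) with
  | none => false
  | some last =>
    if value > last then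
      if 2 ≤ chain.length then
        match PySem.List.pyGet? chain (-2) with
        | none => false
        | some secondLast => decide (value < secondLast)
      else false
    else decide (value < last)

def a_step (chains : List (List Int)) (value : Int) : List (List Int) :=
  let newChains := chains.map (fun c => (a_stepChain value c).1)
  if chains.any (fun c => a_chainTouched value c) then newChains
  else newChains ++ [[value]]

def decreasing_triplet_chain (l : List Int) : Bool :=
  if l.length < 3 then false
  else (l.foldl a_step []).any (fun c => 3 ≤ c.length)

-- ===== PORT B =====

-- state: (first = max so far, second = max value with a strictly greater earlier value, found)
def b_step (st : Option Int × Option Int × Bool) (x : Int) : Option Int × Option Int × Bool :=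
  match st with
  | (first, second, found) =>
    if found then (first, second, true)
    else if second.any (fun s => x < s) then (first, second, true)
    else if first.all (fun f => f ≤ x) then (some x, second, false)
    else if second.all (fun s => s < x) then (first, some x, false)
    else (first, second, false)

def decreasing_triplet_chain_alt (l : List Int) : Bool :=
  (l.foldl b_step (none, none, false)).2.2

-- ===== PRECONDITION & SPEC =====
def Spec_decreasing_triplet_chain (l : List Int) (out : Bool) : Prop := out = decreasing_triplet_chain_alt l
instance (l : List Int) (out : Bool) : Decidable (Spec_decreasing_triplet_chain l out) := by unfold Spec_decreasing_triplet_chain; infer_instance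

-- ===== CLAIM (what is proved, stated in full; the proofs are below) =====
def Claim_equal_decreasing_triplet_chain : Prop := ∀ (l : List Int), Dom_decreasing_triplet_chain l → Spec_decreasing_triplet_chain l (decreasing_triplet_chain l)

-- ===== LEMMAS AND PROOFS =====

-- The shape of A's state while no triple has been found: every chain is [a] or [a,b] with
-- b < a ≤ m; some chain starts with the prefix maximum m; when s (B's "second") is defined it
-- is the last element of some 2-chain and bounds the last elements of all 2-chains.
def GoodState (chains : List (List Int)) (f s : Option Int) : Prop :=
  match f with
  | none => chains = [] ∧ s = none
  | some m =>
    (∀ c ∈ chains,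
        (∃ a, c = [a] ∧ a ≤ m) ∨
        (∃ a b, c = [a, b] ∧ b < a ∧ a ≤ m ∧ ∃ s0, s = some s0 ∧ b ≤ s0)) ∧
    (∃ c ∈ chains, c.head? = some m) ∧
    (∀ s0, s = some s0 → ∃ a, [a, s0] ∈ chains ∧ s0 < a ∧ a ≤ m)

def StateRel (chains : List (List Int)) (st : Option Int × Option Int × Bool) : Prop :=
  if st.2.2 then ∃ c ∈ chains, 3 ≤ c.length
  else GoodState chains st.1 st.2.1

theorem a_stepChain_single (v a : Int) :
    a_stepChain v [a] = if v < a then ([a, v], true) else ([a], false) := by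
  simp [a_stepChain, PySem.List.pyGet?, PySem.List.pyIdx?]
  omega

theorem a_chainTouched_single (v a : Int) :
    a_chainTouched v [a] = decide (v < a) := by
  simp [a_chainTouched, PySem.List.pyGet?, PySem.List.pyIdx?]
  omega

theorem a_stepChain_pair (v a b : Int) :
    a_stepChain v [a, b] =
      if b < v then (if v < a then ([a, v], false) else ([a, b], false))
      else if v < b then ([a, b, v], true) else ([a, b], false) := by
  simp only [a_stepChain, PySem.List.pyGet?, PySem.List.pyIdx?]
  norm_num

theorem a_chainTouched_pair (v a b : Int) (hab : b < a) :
    a_chainTouched v [a, b] = decide (v < a ∧ v ≠ b) := by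
  simp only [a_chainTouched, PySem.List.pyGet?, PySem.List.pyIdx?]
  norm_num
  split_ifs with h <;> rw [Bool.eq_iff_iff] <;> simp <;> omega

theorem a_stepChain_len (v : Int) (c : List Int) :
    c.length ≤ (a_stepChain v c).1.length := by
  unfold a_stepChain
  rcases h : PySem.List.pyGet? c (-1) with _ | last
  · simp
  · have hc : 0 < c.length := by
      rcases c with _ | _
      · simp [PySem.List.pyGet?, PySem.List.pyIdx?] at h
      · simp
    simp only []
    split_ifs with h1 h2
    · rcases h3 : PySem.List.pyGet? c (-2) with _ | sl
      · simp
      · simp only []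
        split_ifs with h4
        · simp only [List.length_append, List.length_dropLast, List.length_singleton]
          omega
        · simp
    · simp
    · simp
    · simp

theorem goodstate_append (cs : List (List Int)) (m x : Int) (s : Option Int)
    (h : GoodState cs (some m) s) (hx : x ≤ m) : GoodState (cs ++ [[x]]) (some m) s := by
  obtain ⟨h1, ⟨cm, hcm, hh⟩, h3⟩ := h
  refine ⟨?_, ⟨cm, List.mem_append_left _ hcm, hh⟩, ?_⟩
  · intro c hc
    rcases List.mem_append.mp hc with hc | hc
    · exact h1 c hc
    · simp only [List.mem_singleton] at hc; subst hc; exact Or.inl ⟨x, rfl, hx⟩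
  · intro s0 hs0
    obtain ⟨a, ha, h4, h5⟩ := h3 s0 hs0
    exact ⟨a, List.mem_append_left _ ha, h4, h5⟩

theorem step_preserves (chains : List (List Int)) (st : Option Int × Option Int × Bool) (x : Int)
    (h : StateRel chains st) : StateRel (a_step chains x) (b_step st x) := by
  obtain ⟨f, s, found⟩ := st
  by_cases hfound : found = true
  · subst hfound
    simp only [StateRel, if_true] at h
    obtain ⟨c, hc, hlen⟩ := h
    have hmem : (a_stepChain x c).1 ∈ chains.map (fun c => (a_stepChain x c).1) :=
      List.mem_map_of_mem hc
    have hlen' : 3 ≤ (a_stepChain x c).1.length := le_trans hlen (a_stepChain_len x c)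
    simp only [b_step, StateRel, if_true]
    unfold a_step
    split
    · exact ⟨_, hmem, hlen'⟩
    · exact ⟨_, List.mem_append_left _ hmem, hlen'⟩
  · replace hfound : found = false := by simpa using hfound
    subst hfound
    simp only [StateRel, if_false, Bool.false_eq_true] at h
    cases f with
    | none =>
      obtain ⟨hc0, hs0⟩ := h
      subst hc0; subst hs0
      simp [a_step, b_step, StateRel, GoodState]
    | some m =>
      obtain ⟨h1, ⟨cm, hcm, hcmhead⟩, h3⟩ := h
      by_cases hdet : ∃ s0, s = some s0 ∧ x < s0
      · -- detection: a value below B's "second"; A's witness 2-chain grows to length 3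
        obtain ⟨s0, rfl, hxs⟩ := hdet
        obtain ⟨a1, ha1, hs0a1, ha1m⟩ := h3 s0 rfl
        have hbs : b_step (some m, some s0, false) x = (some m, some s0, true) := by
          simp [b_step, hxs]
        rw [hbs]
        simp only [StateRel, if_true]
        have hg : (a_stepChain x [a1, s0]).1 = [a1, s0, x] := by
          rw [a_stepChain_pair]
          have : ¬ s0 < x := by omega
          simp [this, hxs]
        have hmem : (a_stepChain x [a1, s0]).1 ∈ chains.map (fun c => (a_stepChain x c).1) :=
          List.mem_map_of_mem ha1
        rw [hg] at hmem
        unfold a_step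
        split
        · exact ⟨_, hmem, by simp⟩
        · exact ⟨_, List.mem_append_left _ hmem, by simp⟩
      · -- no detection
        have hnodet : ∀ s0, s = some s0 → s0 ≤ x := by
          intro s0 hs0
          by_contra hlt
          exact hdet ⟨s0, hs0, by omega⟩
        by_cases hmx : m ≤ x
        · -- x is a new (weak) maximum: no chain is touched, a new chain [x] is created
          have huntouched : ∀ c ∈ chains,
              a_chainTouched x c = false ∧ (a_stepChain x c).1 = c := by
            intro c hc
            rcases h1 c hc with ⟨a, rfl, ham⟩ | ⟨a, b, rfl, hba, ham, _⟩
            · rw [a_chainTouched_single, a_stepChain_single]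
              constructor
              · simp; omega
              · rw [if_neg (by omega)]
            · rw [a_chainTouched_pair x a b hba, a_stepChain_pair]
              constructor
              · simp; omega
              · rw [if_pos (by omega), if_neg (by omega)]
          have hmap : chains.map (fun c => (a_stepChain x c).1) = chains := by
            rw [List.map_congr_left (fun c hc => (huntouched c hc).2)]; simp
          have hany : chains.any (fun c => a_chainTouched x c) = false := by
            rw [List.any_eq_false]
            intro c hc
            simp [(huntouched c hc).1]
          have hstep : a_step chains x = chains ++ [[x]] := by
            unfold a_step
            rw [if_neg (by simp [hany]), hmap]
          have hbs : b_step (some m, s, false) x = (some x, s, false) := by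
            cases s with
            | none => simp [b_step, hmx]
            | some s0 =>
              have h1' := hnodet s0 rfl
              have h2' : ¬ x < s0 := by omega
              simp [b_step, hmx, h2']
          rw [hstep, hbs]
          simp only [StateRel, if_false, Bool.false_eq_true, GoodState]
          refine ⟨?_, ⟨[x], List.mem_append_right _ (by simp), rfl⟩, ?_⟩
          · intro c hc
            rcases List.mem_append.mp hc with hc | hc
            · rcases h1 c hc with ⟨a, rfl, ham⟩ | ⟨a, b, rfl, hba, ham, hs⟩
              · exact Or.inl ⟨a, rfl, by omega⟩
              · exact Or.inr ⟨a, b, rfl, hba, by omega, hs⟩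
            · simp only [List.mem_singleton] at hc; subst hc
              exact Or.inl ⟨x, rfl, le_refl x⟩
          · intro s0 hs0
            obtain ⟨a, ha, h4, h5⟩ := h3 s0 hs0
            exact ⟨a, List.mem_append_left _ ha, h4, by omega⟩
        · -- x < m: x is recorded as the last element of the chain headed by m
          have hxm : x < m := by omega
          -- the chain headed by m and its image under the step
          have hcmcases : cm = [m] ∨ ∃ b, cm = [m, b] ∧ b < m ∧ ∃ s0, s = some s0 ∧ b ≤ s0 := by
            rcases h1 cm hcm with ⟨a, rfl, ham⟩ | ⟨a, b, rfl, hba, ham, hs⟩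
            · simp only [List.head?_cons, Option.some.injEq] at hcmhead
              subst hcmhead; exact Or.inl rfl
            · simp only [List.head?_cons, Option.some.injEq] at hcmhead
              subst hcmhead; exact Or.inr ⟨b, rfl, hba, hs⟩
          by_cases hs0x : ∃ s0, s = some s0 ∧ s0 = x
          · -- x equals the current "second": B's state is unchanged, A's witnesses survive
            obtain ⟨s0, rfl, hxeq⟩ := hs0x
            have hbs : b_step (some m, some s0, false) x = (some m, some s0, false) := by
              have h2' : ¬ x < s0 := by omega
              have h3' : ¬ s0 < x := by omega
              simp [b_step, hmx, h2', h3']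
            rw [hbs]
            simp only [StateRel, if_false, Bool.false_eq_true]
            have hgood : GoodState (chains.map (fun c => (a_stepChain x c).1)) (some m) (some s0) := by
              refine ⟨?_, ?_, ?_⟩
              · intro c' hc'
                obtain ⟨c, hc, rfl⟩ := List.mem_map.mp hc'
                rcases h1 c hc with ⟨a, rfl, ham⟩ | ⟨a, b, rfl, hba, ham, s1, hseq, hbs1⟩
                · rw [a_stepChain_single]
                  split_ifs with hxa
                  · exact Or.inr ⟨a, x, rfl, hxa, ham, s0, rfl, by omega⟩
                  · exact Or.inl ⟨a, rfl, ham⟩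
                · have he : s0 = s1 := by injection hseq
                  subst he
                  rw [a_stepChain_pair]
                  split_ifs with hbx hxa hxb
                  · exact Or.inr ⟨a, x, rfl, hxa, ham, s0, rfl, by omega⟩
                  · exact Or.inr ⟨a, b, rfl, hba, ham, s0, rfl, hbs1⟩
                  · omega
                  · exact Or.inr ⟨a, b, rfl, hba, ham, s0, rfl, hbs1⟩
              · refine ⟨(a_stepChain x cm).1, List.mem_map_of_mem hcm, ?_⟩
                rcases hcmcases with rfl | ⟨b, rfl, hbm, s1, hseq, hbs1⟩
                · rw [a_stepChain_single]
                  split_ifs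
                  all_goals rfl
                · rw [a_stepChain_pair]; split_ifs <;> rfl
              · intro s1 hs1
                have he : s0 = s1 := by injection hs1
                subst he
                obtain ⟨a1, ha1, hs0a1, ha1m⟩ := h3 s0 rfl
                refine ⟨a1, ?_, hs0a1, ha1m⟩
                have : (a_stepChain x [a1, s0]).1 = [a1, s0] := by
                  rw [a_stepChain_pair, if_neg (by omega), if_neg (by omega)]
                rw [← this]
                exact List.mem_map_of_mem ha1
            unfold a_step
            split
            · exact hgood
            · exact goodstate_append _ m x (some s0) hgood (by omega)
          · -- x is strictly between the current "second" (if any) and m: it becomes the new second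
            have hsx : ∀ s0, s = some s0 → s0 < x := by
              intro s0 hs0
              have := hnodet s0 hs0
              rcases lt_or_eq_of_le this with h' | h'
              · exact h'
              · exact absurd ⟨s0, hs0, h'⟩ hs0x
            have hbs : b_step (some m, s, false) x = (some m, some x, false) := by
              cases s with
              | none => simp [b_step, hmx]
              | some s0 =>
                have h1' := hsx s0 rfl
                have h2' : ¬ x < s0 := by omega
                simp [b_step, hmx, h2', h1']
            rw [hbs]
            simp only [StateRel, if_false, Bool.false_eq_true]
            -- the chain headed by m is touched, so no new chain is created; but we do not need
            -- that: its image [m, x] provides both the head witness and the second-witness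
            have hgcm : (a_stepChain x cm).1 = [m, x] := by
              rcases hcmcases with rfl | ⟨b, rfl, hbm, s1, hseq, hbs1⟩
              · rw [a_stepChain_single, if_pos hxm]
              · have hs1x := hsx s1 hseq
                rw [a_stepChain_pair, if_pos (by omega), if_pos (by omega)]
            have hmemcm : [m, x] ∈ chains.map (fun c => (a_stepChain x c).1) := by
              rw [← hgcm]; exact List.mem_map_of_mem hcm
            have hgood : GoodState (chains.map (fun c => (a_stepChain x c).1)) (some m) (some x) := by
              refine ⟨?_, ⟨[m, x], hmemcm, rfl⟩, ?_⟩
              · intro c' hc'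
                obtain ⟨c, hc, rfl⟩ := List.mem_map.mp hc'
                rcases h1 c hc with ⟨a, rfl, ham⟩ | ⟨a, b, rfl, hba, ham, s1, hseq, hbs1⟩
                · rw [a_stepChain_single]
                  split_ifs with hxa
                  · exact Or.inr ⟨a, x, rfl, hxa, ham, x, rfl, le_refl _⟩
                  · exact Or.inl ⟨a, rfl, ham⟩
                · have hs1x := hsx s1 hseq
                  rw [a_stepChain_pair]
                  split_ifs with hbx hxa hxb
                  · exact Or.inr ⟨a, x, rfl, hxa, ham, x, rfl, le_refl _⟩
                  · exact Or.inr ⟨a, b, rfl, hba, ham, x, rfl, by omega⟩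
                  · omega
                  · exact Or.inr ⟨a, b, rfl, hba, ham, x, rfl, by omega⟩
              · intro s1 hs1
                have he : x = s1 := by injection hs1
                subst he
                exact ⟨m, hmemcm, hxm, le_refl m⟩
            unfold a_step
            split
            · exact hgood
            · exact goodstate_append _ m x (some x) hgood (by omega)

theorem foldl_rel (l : List Int) (chains : List (List Int)) (st : Option Int × Option Int × Bool)
    (h : StateRel chains st) : StateRel (l.foldl a_step chains) (l.foldl b_step st) := by
  induction l generalizing chains st with
  | nil => exact h
  | cons x xs ih => exact ih _ _ (step_preserves chains st x h)

theorem rel_any (chains : List (List Int)) (st : Option Int × Option Int × Bool)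
    (h : StateRel chains st) : chains.any (fun c => 3 ≤ c.length) = st.2.2 := by
  unfold StateRel at h
  split at h
  · next hb =>
    rw [hb]
    obtain ⟨c, hc, hlen⟩ := h
    rw [List.any_eq_true]
    exact ⟨c, hc, by simpa using hlen⟩
  · next hb =>
    rw [Bool.of_not_eq_true hb, List.any_eq_false]
    intro c hc
    simp only [decide_eq_true_eq, not_le]
    cases hf : st.1 with
    | none => rw [hf] at h; obtain ⟨rfl, -⟩ := h; simp at hc
    | some m =>
      rw [hf] at h
      obtain ⟨h1, -, -⟩ := h
      rcases h1 c hc with ⟨a, rfl, -⟩ | ⟨a, b, rfl, -⟩ <;> simp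

theorem short_alt_false (l : List Int) (hlen : l.length < 3) :
    decreasing_triplet_chain_alt l = false := by
  match l, hlen with
  | [], _ => rfl
  | [a], _ =>
    simp only [decreasing_triplet_chain_alt, List.foldl, b_step]
    simp
  | [a, b], _ =>
    simp only [decreasing_triplet_chain_alt, List.foldl, b_step]
    simp only [Option.any_none, Option.all_none, if_false, if_true, Bool.false_eq_true]
    norm_num
    split_ifs <;> simp

-- ===== VERDICT (by name: the statement is the Claim_ definition above) =====
theorem decreasing_triplet_chain_spec : Claim_equal_decreasing_triplet_chain := by
  intro l _
  unfold Spec_decreasing_triplet_chain decreasing_triplet_chain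
  split_ifs with hlen
  · exact (short_alt_false l hlen).symm
  · have h0 : StateRel [] (none, none, false) := by
      simp [StateRel, GoodState]
    have := rel_any _ _ (foldl_rel l [] _ h0)
    rw [this]; rfl
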